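-- pv_equiv track=rewrite | github.com/ggiaroli/MWEM | MWEM.py | queryToBinary
-- ===== SOURCE A (Python) =====
-- def queryToBinary(qi, length):
--     binary = [0]*length
--     key = list(qi)[0]
--     startInd = min(key, qi[key])
--     endInd = max(key, qi[key])
--     for i in range(length):
--         if (i >= startInd) and (i <= endInd):
--             binary[i] = 1
--     return binary
-- ===== SOURCE B (Python) =====
-- def queryToBinary(qi, length):
--     key = next(iter(qi))
--     other = qi[key]
--     lo = max(0, min(key, other))
--     hi = min(length - 1, max(key, other))
--     if hi < lo:
--         return [0] * length
--     return [0] * lo + [1] * (hi - lo + 1) + [0] * (length - hi - 1)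
-- ===== Notes on version B (the rewrite author's own statement) =====
-- stated objective: simpler
-- what changed: B clamps the [startInd,endInd] interval to [0,length-1] and builds the mask as a concatenation of three constant runs, instead of scanning every index and testing a conditional per element.
import Mathlib
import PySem

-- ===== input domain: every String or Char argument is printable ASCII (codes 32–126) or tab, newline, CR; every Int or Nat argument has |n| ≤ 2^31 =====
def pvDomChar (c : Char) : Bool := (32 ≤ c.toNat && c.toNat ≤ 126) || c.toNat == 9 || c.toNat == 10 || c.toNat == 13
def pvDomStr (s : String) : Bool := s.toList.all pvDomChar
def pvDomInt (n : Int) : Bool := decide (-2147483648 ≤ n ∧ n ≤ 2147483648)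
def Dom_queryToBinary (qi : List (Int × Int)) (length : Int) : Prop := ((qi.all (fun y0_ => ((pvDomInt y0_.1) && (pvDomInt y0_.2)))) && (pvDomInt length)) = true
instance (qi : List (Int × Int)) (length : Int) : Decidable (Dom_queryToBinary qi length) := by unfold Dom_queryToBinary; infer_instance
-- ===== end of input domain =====

-- B builds the mask by concatenating three constant runs (clamped interval) instead of
-- scanning every index with a per-element conditional; objective: simpler.

-- ===== PORT A =====
-- binary = [0]*length; key = list(qi)[0]; start/end = min/max(key, qi[key]);
-- loop over range(length) setting binary[i] = 1 inside the interval.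
def queryToBinary (qi : List (Int × Int)) (length : Int) : List Int :=
  let binary := PySem.List.pyRepeat [(0 : Int)] length
  match PySem.List.pyGet? (qi.map Prod.fst) 0 with
  | none => binary   -- list(qi)[0] raises IndexError in Python; excluded by Pre_
  | some key =>
    let v := (qi.lookup key).getD 0   -- qi[key]: first-match association-list lookup
    let startInd := min key v
    let endInd := max key v
    (PySem.List.pyRange 0 length 1).foldl
      (fun b i => if startInd ≤ i ∧ i ≤ endInd then b.set i.toNat 1 else b) binary

-- ===== PORT B =====
-- key = next(iter(qi)); clamp interval to [0, length-1]; concatenate three runs.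
def queryToBinary_alt (qi : List (Int × Int)) (length : Int) : List Int :=
  match qi with
  | [] => []   -- next(iter(qi)) raises StopIteration in Python; excluded by Pre_
  | (key, _) :: _ =>
    let other := (qi.lookup key).getD 0
    let lo := max 0 (min key other)
    let hi := min (length - 1) (max key other)
    if hi < lo then List.replicate length.toNat 0
    else List.replicate lo.toNat 0 ++ List.replicate (hi - lo + 1).toNat 1
         ++ List.replicate (length - hi - 1).toNat 0

-- ===== PRECONDITION & SPEC =====
-- Pre_ excludes only the empty dict, on which A raises IndexError at list(qi)[0].
def Pre_queryToBinary (qi : List (Int × Int)) (length : Int) : Prop := qi ≠ []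
instance (qi : List (Int × Int)) (length : Int) : Decidable (Pre_queryToBinary qi length) := by unfold Pre_queryToBinary; infer_instance
def pvWitness_queryToBinary : (List (Int × Int)) × Int := ([(1, 2)], 4)

def Spec_queryToBinary (qi : List (Int × Int)) (length : Int) (out : List Int) : Prop := out = queryToBinary_alt qi length
instance (qi : List (Int × Int)) (length : Int) (out : List Int) : Decidable (Spec_queryToBinary qi length out) := by unfold Spec_queryToBinary; infer_instance

-- ===== CLAIM (what is proved, stated in full; the proofs are below) =====
def Claim_equal_queryToBinary : Prop := ∀ (qi : List (Int × Int)) (length : Int), Dom_queryToBinary qi length → Pre_queryToBinary qi length → Spec_queryToBinary qi length (queryToBinary qi length)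

-- ===== LEMMAS AND PROOFS =====

-- the A-side marking loop, characterised index by index
lemma mark_getElem? (s e : Int) (a L : Int) (l : List Int) (j : Nat) (ha : 0 ≤ a) :
    ((PySem.List.pyRange a L 1).foldl
      (fun b i => if s ≤ i ∧ i ≤ e then b.set i.toNat 1 else b) l)[j]?
    = if a ≤ (j : Int) ∧ (j : Int) < L ∧ s ≤ (j : Int) ∧ (j : Int) ≤ e ∧ j < l.length
      then some 1 else l[j]? := by
  by_cases h : a < L
  · rw [PySem.List.pyRange_one_cons h]
    simp only [List.foldl_cons]
    rw [mark_getElem? s e (a + 1) L _ j (by omega)]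
    by_cases hse : s ≤ a ∧ a ≤ e
    · simp only [if_pos hse, List.length_set, List.getElem?_set]
      by_cases hj : a.toNat = j
      · have hja : a = (j : Int) := by omega
        rw [if_pos hj]
        split_ifs <;>
          first | rfl | omega | (exact (List.getElem?_eq_none (by omega)).symm)
      · rw [if_neg hj]
        split_ifs <;> first | rfl | omega
    · simp only [if_neg hse]
      split_ifs <;> first | rfl | omega
  · rw [PySem.List.pyRange_one_eq_nil (by omega)]
    simp only [List.foldl_nil]
    split_ifs with hc
    · omega
    · rfl
termination_by (L - a).toNat
decreasing_by omega

theorem queryToBinary_spec : Claim_equal_queryToBinary := by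
  intro qi length _ hpre
  unfold Spec_queryToBinary
  match qi with
  | [] => exact absurd rfl hpre
  | (key, w) :: rest =>
    unfold queryToBinary queryToBinary_alt
    simp only [List.map_cons, PySem.List.pyGet?_zero_cons]
    set v := (((key, w) :: rest).lookup key).getD 0 with hv
    set s := min key v with hs
    set e := max key v with he
    set lo := max 0 s with hlo
    set hi := min (length - 1) e with hhi
    have hrep : PySem.List.pyRepeat [(0 : Int)] length = List.replicate length.toNat 0 :=
      PySem.List.pyRepeat_singleton _ _
    apply List.ext_getElem?
    intro j
    rw [hrep, mark_getElem? s e 0 length _ j le_rfl]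
    simp only [List.length_replicate, List.getElem?_replicate]
    by_cases hcase : hi < lo
    · rw [if_pos hcase]
      simp only [List.getElem?_replicate]
      split_ifs <;> first | rfl | omega
    · rw [if_neg hcase]
      have h0 : (0:Int) ≤ lo := by omega
      have h1 : lo ≤ hi := by omega
      have h2 : hi ≤ length - 1 := by omega
      simp only [List.getElem?_append, List.getElem?_replicate, List.length_append,
        List.length_replicate]
      split_ifs <;> first | rfl | omega
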